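-- pv_equiv track=rewrite | github.com/donnelt6/2026-csc1097-donnelt6-szumlig2 | src/apps/worker/worker/youtube.py | _select_caption_format
-- ===== SOURCE A (Python) =====
-- from typing import Optional
--
-- def _select_caption_format(lang: str, formats: list[dict]) -> Optional[tuple[str, str, str]]:
--     if not formats or not isinstance(formats, list):
--         return None
--     preferred_exts = ["vtt", "srt", "json3", "srv1", "srv2", "srv3", "ttml"]
--     for ext in preferred_exts:
--         for item in formats:
--             if item.get("ext") == ext and item.get("url"):
--                 return lang, item["url"], ext
--     for item in formats:
--         if item.get("url"):
--             return lang, item["url"], item.get("ext") or "vtt"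
--     return None
-- ===== SOURCE B (Python) =====
-- def _select_caption_format(lang, formats):
--     if not formats or not isinstance(formats, list):
--         return None
--     by_ext = {}
--     fallback = None
--     for item in formats:
--         url = item.get("url")
--         if not url:
--             continue
--         ext = item.get("ext")
--         if ext is not None and ext not in by_ext:
--             by_ext[ext] = url
--         if fallback is None:
--             fallback = (url, ext)
--     for ext in ("vtt", "srt", "json3", "srv1", "srv2", "srv3", "ttml"):
--         if ext in by_ext:
--             return lang, by_ext[ext], ext
--     if fallback is not None:
--         url, ext = fallback
--         return lang, url, ext or "vtt"
--     return None
-- ===== Notes on version B (the rewrite author's own statement) =====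
-- stated objective: alternative
-- what changed: Single pass over formats builds a first-occurrence ext->url index and remembers the first truthy-url item, replacing A's per-preferred-extension rescans of the list and its separate fallback scan with lookups in the index.
import Mathlib
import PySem

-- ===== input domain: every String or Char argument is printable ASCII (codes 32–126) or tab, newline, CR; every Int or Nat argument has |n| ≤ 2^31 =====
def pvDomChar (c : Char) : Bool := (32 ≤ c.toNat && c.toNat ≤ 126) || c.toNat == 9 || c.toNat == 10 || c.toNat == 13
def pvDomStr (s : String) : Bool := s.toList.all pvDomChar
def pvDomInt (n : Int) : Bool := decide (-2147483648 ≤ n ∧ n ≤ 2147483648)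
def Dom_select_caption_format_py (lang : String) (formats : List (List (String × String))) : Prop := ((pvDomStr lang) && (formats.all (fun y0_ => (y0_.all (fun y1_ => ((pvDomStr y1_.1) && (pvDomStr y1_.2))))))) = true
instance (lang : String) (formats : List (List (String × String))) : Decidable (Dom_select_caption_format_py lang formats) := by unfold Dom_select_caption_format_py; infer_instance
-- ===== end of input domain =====

-- B replaces A's rescan of the list for each preferred extension (plus a separate
-- fallback scan) with a single pass building a first-occurrence ext->url index and
-- remembering the first truthy-url item; only the return value is at stake (no mutation).

-- ===== PORT A =====
-- inner 'for item in formats' loop of A, for one preferred ext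
def pvAInner (lang ext : String) : List (List (String × String)) → Option (String × String × String)
  | [] => none
  | item :: rest =>
    match PySem.Dict.get? (PySem.Dict.mk item) "url" with
    | some u =>
        if (PySem.Dict.get? (PySem.Dict.mk item) "ext" == some ext) && (u != "") then
          some (lang, u, ext)
        else pvAInner lang ext rest
    | none => pvAInner lang ext rest

-- outer 'for ext in preferred_exts' loop of A
def pvAOuter (lang : String) (formats : List (List (String × String))) : List String → Option (String × String × String)
  | [] => none
  | ext :: rest =>
    match pvAInner lang ext formats with
    | some r => some r
    | none => pvAOuter lang formats rest

-- A's final fallback loop: first item with a truthy url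
def pvAFallback (lang : String) : List (List (String × String)) → Option (String × String × String)
  | [] => none
  | item :: rest =>
    match PySem.Dict.get? (PySem.Dict.mk item) "url" with
    | some u =>
        if u != "" then
          some (lang, u,
            match PySem.Dict.get? (PySem.Dict.mk item) "ext" with
            | some e => if e != "" then e else "vtt"
            | none => "vtt")
        else pvAFallback lang rest
    | none => pvAFallback lang rest

def select_caption_format_py (lang : String) (formats : List (List (String × String))) : Option (String × String × String) :=
  if formats = [] then none
  else
    match pvAOuter lang formats ["vtt", "srt", "json3", "srv1", "srv2", "srv3", "ttml"] with
    | some r => some r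
    | none => pvAFallback lang formats

-- ===== PORT B =====
-- one step of B's single pass: update the ext->url index and the remembered fallback
def pvBStep (st : PySem.Dict String String × Option (String × Option String))
    (item : List (String × String)) : PySem.Dict String String × Option (String × Option String) :=
  match PySem.Dict.get? (PySem.Dict.mk item) "url" with
  | none => st
  | some u =>
      if u = "" then st
      else
        let e? := PySem.Dict.get? (PySem.Dict.mk item) "ext"
        let d := match e? with
          | some e => if (PySem.Dict.get? st.1 e).isSome then st.1 else PySem.Dict.insert st.1 e u
          | none => st.1
        let fb := match st.2 with
          | some f => some f
          | none => some (u, e?)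
        (d, fb)

-- B's lookup loop over the preferred extensions
def pvBLookup (lang : String) (d : PySem.Dict String String) : List String → Option (String × String × String)
  | [] => none
  | e :: rest =>
    match PySem.Dict.get? d e with
    | some u => some (lang, u, e)
    | none => pvBLookup lang d rest

def select_caption_format_py_alt (lang : String) (formats : List (List (String × String))) : Option (String × String × String) :=
  if formats = [] then none
  else
    let st := formats.foldl pvBStep (PySem.Dict.empty, none)
    match pvBLookup lang st.1 ["vtt", "srt", "json3", "srv1", "srv2", "srv3", "ttml"] with
    | some r => some r
    | none =>
      match st.2 with
      | some (u, e?) =>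
          some (lang, u,
            match e? with
            | some e => if e ≠ "" then e else "vtt"
            | none => "vtt")
      | none => none

-- ===== PRECONDITION & SPEC =====
def Spec_select_caption_format_py (lang : String) (formats : List (List (String × String))) (out : Option (String × String × String)) : Prop := out = select_caption_format_py_alt lang formats
instance (lang : String) (formats : List (List (String × String))) (out : Option (String × String × String)) : Decidable (Spec_select_caption_format_py lang formats out) := by unfold Spec_select_caption_format_py; infer_instance

-- ===== CLAIM (what is proved, stated in full; the proofs are below) =====
def Claim_equal_select_caption_format_py : Prop := ∀ (lang : String) (formats : List (List (String × String))), Dom_select_caption_format_py lang formats → Spec_select_caption_format_py lang formats (select_caption_format_py lang formats)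

-- ===== LEMMAS AND PROOFS =====

-- specification of the ext->url index: url of the first item with this ext and a truthy url
def pvFirstUrlFor (ext : String) : List (List (String × String)) → Option String
  | [] => none
  | item :: rest =>
    match PySem.Dict.get? (PySem.Dict.mk item) "url" with
    | some u =>
        if (PySem.Dict.get? (PySem.Dict.mk item) "ext" == some ext) && (u != "") then some u
        else pvFirstUrlFor ext rest
    | none => pvFirstUrlFor ext rest

-- specification of the fallback: (url, ext?) of the first item with a truthy url
def pvFirstUrl : List (List (String × String)) → Option (String × Option String)
  | [] => none
  | item :: rest =>
    match PySem.Dict.get? (PySem.Dict.mk item) "url" with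
    | some u =>
        if u != "" then some (u, PySem.Dict.get? (PySem.Dict.mk item) "ext")
        else pvFirstUrl rest
    | none => pvFirstUrl rest

theorem pvBStep_fold_snd (formats : List (List (String × String)))
    (d : PySem.Dict String String) (fb : Option (String × Option String)) :
    (formats.foldl pvBStep (d, fb)).2 = (match fb with | some f => some f | none => pvFirstUrl formats) := by
  induction formats generalizing d fb with
  | nil => cases fb <;> simp [pvFirstUrl]
  | cons item rest ih =>
    simp only [List.foldl_cons, pvBStep, pvFirstUrl]
    cases hget : PySem.Dict.get? (PySem.Dict.mk item) "url" with
    | none => simp [ih]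
    | some u =>
      by_cases hu : u = "" <;> simp [hu, ih] <;> cases fb <;> simp

theorem pvBStep_fold_fst (formats : List (List (String × String)))
    (d : PySem.Dict String String) (fb : Option (String × Option String)) (e : String) :
    PySem.Dict.get? (formats.foldl pvBStep (d, fb)).1 e =
      (match PySem.Dict.get? d e with | some u => some u | none => pvFirstUrlFor e formats) := by
  induction formats generalizing d fb with
  | nil => cases h : PySem.Dict.get? d e <;> simp [pvFirstUrlFor, h]
  | cons item rest ih =>
    simp only [List.foldl_cons, pvBStep, pvFirstUrlFor]
    cases hget : PySem.Dict.get? (PySem.Dict.mk item) "url" with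
    | none => simp [ih]
    | some u =>
      by_cases hu : u = ""
      · simp [hu, ih]
      · simp only [hu, if_neg (by simp [hu] : ¬ u = "")]
        cases hext : PySem.Dict.get? (PySem.Dict.mk item) "ext" with
        | none =>
          simp only []
          rw [ih]
          cases h : PySem.Dict.get? d e <;> simp [h, hext]
        | some x =>
          by_cases hde : (PySem.Dict.get? d x).isSome
          · -- already present: no insert
            simp only [hde, if_pos rfl]
            rw [ih]
            cases h : PySem.Dict.get? d e with
            | some v => simp [h]
            | none =>
              -- e ≠ x here (d.get? x is some, d.get? e is none), so the ext==e test fails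
              by_cases hex : x = e
              · subst hex; rw [h] at hde; simp at hde
              · simp [h, hext, hex]
          · have hde' : (PySem.Dict.get? d x).isSome = false := by simpa using hde
            simp only [hde', Bool.false_eq_true, if_false]
            rw [ih, PySem.Dict.get?_insert]
            by_cases hex : e = x
            · subst hex
              simp only [if_pos rfl]
              cases h : PySem.Dict.get? d e with
              | some v => rw [h] at hde'; simp at hde'
              | none => simp [h, hu]
            · rw [if_neg hex]
              cases h : PySem.Dict.get? d e <;> simp [h, hext, Ne.symm hex]

theorem pvAInner_eq (lang e : String) (formats : List (List (String × String))) :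
    pvAInner lang e formats = (pvFirstUrlFor e formats).map (fun u => (lang, u, e)) := by
  induction formats with
  | nil => simp [pvAInner, pvFirstUrlFor]
  | cons item rest ih =>
    simp only [pvAInner, pvFirstUrlFor]
    cases hget : PySem.Dict.get? (PySem.Dict.mk item) "url" with
    | none => simpa using ih
    | some u =>
      by_cases hc : (PySem.Dict.get? (PySem.Dict.mk item) "ext" == some e) && (u != "") <;>
        simp [hc, ih]

theorem pvAFallback_eq (lang : String) (formats : List (List (String × String))) :
    pvAFallback lang formats = (pvFirstUrl formats).map (fun p =>
      (lang, p.1, match p.2 with | some e => if e ≠ "" then e else "vtt" | none => "vtt")) := by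
  induction formats with
  | nil => simp [pvAFallback, pvFirstUrl]
  | cons item rest ih =>
    simp only [pvAFallback, pvFirstUrl]
    cases hget : PySem.Dict.get? (PySem.Dict.mk item) "url" with
    | none => simpa using ih
    | some u =>
      by_cases hu : u != ""
      · simp only [hu, if_pos rfl, Option.map_some]
        cases hext : PySem.Dict.get? (PySem.Dict.mk item) "ext" with
        | none => first | rfl | simp
        | some x => by_cases hx : x = "" <;> first | rfl | simp [hx]
      · have hu' : (u != "") = false := by simpa using hu
        simp only [hu', Bool.false_eq_true, if_false]
        exact ih

theorem pvAOuter_eq (lang : String) (formats : List (List (String × String))) (exts : List String) :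
    pvAOuter lang formats exts =
      pvBLookup lang (formats.foldl pvBStep (PySem.Dict.empty, none)).1 exts := by
  induction exts with
  | nil => simp [pvAOuter, pvBLookup]
  | cons e rest ih =>
    simp only [pvAOuter, pvBLookup, pvAInner_eq, pvBStep_fold_fst, PySem.Dict.get?_empty]
    cases h : pvFirstUrlFor e formats <;> simp [ih, pvBStep_fold_fst, PySem.Dict.get?_empty, h]

-- ===== VERDICT (by name: the statement is the Claim_ definition above) =====
theorem select_caption_format_py_spec : Claim_equal_select_caption_format_py := by
  intro lang formats _
  show select_caption_format_py lang formats = select_caption_format_py_alt lang formats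
  unfold select_caption_format_py select_caption_format_py_alt
  by_cases hf : formats = []
  · simp [hf]
  · simp only [hf, if_neg hf]
    rw [← pvAOuter_eq]
    cases h : pvAOuter lang formats ["vtt", "srt", "json3", "srv1", "srv2", "srv3", "ttml"] with
    | some r => simp
    | none =>
      simp only []
      rw [pvBStep_fold_snd, pvAFallback_eq]
      cases hp : pvFirstUrl formats with
      | none => simp
      | some p =>
        obtain ⟨u, e?⟩ := p
        cases e? <;> simp
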